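-- pv_equiv track=rewrite | github.com/Wozniak456/Optimization_by_binary_relation | graph_functions.py | lower_section
-- ===== SOURCE A (Python) =====
-- def lower_section(edges, letters):
--     l_section = {}
--     for letter in letters:
--         l_edges = []
--         for edge in edges:
--             if edge[0] == letter:
--                 l_edges.append(edge[1])
--         l_section[letter] = l_edges
--     return l_section
-- ===== SOURCE B (Python) =====
-- def lower_section(edges, letters):
--     l_section = {letter: [] for letter in letters}
--     for src, dst in edges:
--         bucket = l_section.get(src)
--         if bucket is not None:
--             bucket.append(dst)
--     return l_section
-- ===== Notes on version B (the rewrite author's own statement) =====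
-- stated objective: faster
-- what changed: Replaces the nested scan (one full pass over edges per letter) with a dict pre-seeded with empty buckets and a single pass over edges appending each target to its source's bucket.
import Mathlib
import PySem

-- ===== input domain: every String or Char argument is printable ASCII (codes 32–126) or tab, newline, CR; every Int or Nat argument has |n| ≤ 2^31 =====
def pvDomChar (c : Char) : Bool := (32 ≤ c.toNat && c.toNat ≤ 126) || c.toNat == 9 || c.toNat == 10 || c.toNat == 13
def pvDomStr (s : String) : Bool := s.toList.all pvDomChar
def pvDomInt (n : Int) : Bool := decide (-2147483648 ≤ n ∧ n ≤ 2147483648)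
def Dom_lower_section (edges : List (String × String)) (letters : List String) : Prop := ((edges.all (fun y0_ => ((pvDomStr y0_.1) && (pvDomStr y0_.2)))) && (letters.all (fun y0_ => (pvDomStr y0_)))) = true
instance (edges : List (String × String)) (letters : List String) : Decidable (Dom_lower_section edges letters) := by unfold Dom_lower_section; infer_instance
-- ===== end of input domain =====

-- B replaces A's per-letter rescans of the edge list with one seeded-dict bucketing pass (faster, asymptotic).


-- ===== PORT A =====
-- inner loop of A: collect edge[1] for every edge with edge[0] == letter
def pvInnerA (edges : List (String × String)) (letter : String) : List String :=
  edges.foldl (fun acc e => if e.1 == letter then acc ++ [e.2] else acc) []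

def lower_section (edges : List (String × String)) (letters : List String) : List (String × List String) :=
  (letters.foldl (fun d letter => d.insert letter (pvInnerA edges letter))
    (PySem.Dict.empty : PySem.Dict String (List String))).items

-- ===== PORT B =====
-- seed: {letter: [] for letter in letters}
def pvSeedB (letters : List String) : PySem.Dict String (List String) :=
  letters.foldl (fun d l => d.insert l []) PySem.Dict.empty

-- fill: one pass over edges, appending dst to the src bucket when present
def pvFillB (d : PySem.Dict String (List String)) (edges : List (String × String)) :
    PySem.Dict String (List String) :=
  edges.foldl (fun d e => if d.contains e.1 then d.modify e.1 [] (fun b => b ++ [e.2]) else d) d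

def lower_section_alt (edges : List (String × String)) (letters : List String) : List (String × List String) :=
  (pvFillB (pvSeedB letters) edges).items

-- ===== PRECONDITION & SPEC =====
def Spec_lower_section (edges : List (String × String)) (letters : List String) (out : List (String × List String)) : Prop := out = lower_section_alt edges letters
instance (edges : List (String × String)) (letters : List String) (out : List (String × List String)) : Decidable (Spec_lower_section edges letters out) := by unfold Spec_lower_section; infer_instance

-- ===== CLAIM (what is proved, stated in full; the proofs are below) =====
def Claim_equal_lower_section : Prop := ∀ (edges : List (String × String)) (letters : List String), Dom_lower_section edges letters → Spec_lower_section edges letters (lower_section edges letters)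

-- ===== LEMMAS AND PROOFS =====

-- getD of a fold of inserts with values independent of the dict: last insert at k wins
lemma getD_foldl_insert_fn (v : String → List String) (letters : List String)
    (d : PySem.Dict String (List String)) (k : String) :
    (letters.foldl (fun d l => d.insert l (v l)) d).getD k [] =
      if k ∈ letters then v k else d.getD k [] := by
  induction letters generalizing d with
  | nil => simp
  | cons l ls ih =>
    simp only [List.foldl_cons, ih, PySem.Dict.getD_insert, List.mem_cons]
    by_cases hls : k ∈ ls <;> by_cases hkl : k = l <;> simp [hls, hkl]

-- keys of A's dict
lemma keysA (edges : List (String × String)) (letters : List String) :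
    (letters.foldl (fun d letter => d.insert letter (pvInnerA edges letter))
      (PySem.Dict.empty : PySem.Dict String (List String))).keys = PySem.Set.ofList letters := by
  rw [PySem.Dict.keys_foldl_insert letters (fun _ l => pvInnerA edges l)]
  simp [PySem.Set.update_nil_left]

-- lookup in A's dict
lemma getDA (edges : List (String × String)) (letters : List String) (k : String)
    (hk : k ∈ letters) :
    (letters.foldl (fun d letter => d.insert letter (pvInnerA edges letter))
      (PySem.Dict.empty : PySem.Dict String (List String))).getD k [] = pvInnerA edges k := by
  rw [getD_foldl_insert_fn (fun l => pvInnerA edges l)]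
  simp [hk]

-- seed facts
lemma keys_seed (letters : List String) : (pvSeedB letters).keys = PySem.Set.ofList letters := by
  unfold pvSeedB
  rw [PySem.Dict.keys_foldl_insert letters (fun _ _ => [])]
  simp [PySem.Set.update_nil_left]

lemma getD_seed (letters : List String) (k : String) : (pvSeedB letters).getD k [] = [] := by
  unfold pvSeedB
  rw [getD_foldl_insert_fn (fun _ => [])]
  split <;> simp

-- one step of the fill loop
lemma fill_cons (d : PySem.Dict String (List String)) (e : String × String)
    (rest : List (String × String)) :
    pvFillB d (e :: rest) =
      pvFillB (if d.contains e.1 then d.modify e.1 [] (fun b => b ++ [e.2]) else d) rest := rfl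

-- fill never changes the key list
lemma keys_fill (edges : List (String × String)) (d : PySem.Dict String (List String)) :
    (pvFillB d edges).keys = d.keys := by
  induction edges generalizing d with
  | nil => rfl
  | cons e rest ih =>
    rw [fill_cons]
    by_cases h : d.contains e.1
    · rw [if_pos h, ih, PySem.Dict.keys_modify, PySem.Dict.keys_insert_of_contains]
      exact h
    · rw [if_neg h, ih]

-- lookup after the fill pass
lemma getD_fill (edges : List (String × String)) (d : PySem.Dict String (List String)) (k : String)
    (h : d.contains k = true) :
    (pvFillB d edges).getD k [] = d.getD k [] ++ (edges.filter (fun e => e.1 == k)).map (·.2) := by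
  induction edges generalizing d with
  | nil => simp [pvFillB]
  | cons e rest ih =>
    by_cases hc : d.contains e.1
    · have hstep : (pvFillB d (e :: rest) : PySem.Dict String (List String)) =
        pvFillB (d.modify e.1 [] (fun b => b ++ [e.2])) rest := by rw [fill_cons, if_pos hc]
      have hk' : (d.modify e.1 [] (fun b => b ++ [e.2])).contains k = true := by
        rw [PySem.Dict.contains_modify]; simp [h]
      rw [hstep, ih _ hk', PySem.Dict.getD_modify]
      by_cases hek : e.1 = k
      · simp [hek, List.append_assoc]
      · have : ¬ (k = e.1) := fun hkk => hek hkk.symm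
        simp [this, hek]
    · have hek : e.1 ≠ k := fun hkk => hc (hkk ▸ h)
      have hstep : (pvFillB d (e :: rest) : PySem.Dict String (List String)) = pvFillB d rest := by
        rw [fill_cons, if_neg hc]
      rw [hstep, ih d h]
      simp [hek]

-- the inner loop of A is filter-then-map
lemma innerA_eq (edges : List (String × String)) (k : String) :
    pvInnerA edges k = (edges.filter (fun e => e.1 == k)).map (·.2) := by
  unfold pvInnerA
  simpa using PySem.List.foldl_append_if (fun e : String × String => e.1 == k) (fun e => e.2) edges []

-- ===== VERDICT (by name: the statement is the Claim_ definition above) =====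
theorem lower_section_spec : Claim_equal_lower_section := by
  intro edges letters _
  unfold Spec_lower_section lower_section lower_section_alt
  have hnA : (letters.foldl (fun d letter => d.insert letter (pvInnerA edges letter))
      (PySem.Dict.empty : PySem.Dict String (List String))).keys.Nodup := by
    rw [keysA]; exact PySem.Set.nodup_ofList letters
  have hnB : (pvFillB (pvSeedB letters) edges).keys.Nodup := by
    rw [keys_fill, keys_seed]; exact PySem.Set.nodup_ofList letters
  rw [PySem.Dict.items_eq_map_keys _ hnA [], PySem.Dict.items_eq_map_keys _ hnB [],
    keysA, keys_fill, keys_seed]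
  apply List.map_congr_left
  intro k hk
  have hkl : k ∈ letters := (PySem.Set.mem_ofList _ _).1 hk
  have hcs : (pvSeedB letters).contains k = true := by
    rw [PySem.Dict.contains_iff_mem_keys, keys_seed, PySem.Set.mem_ofList]; exact hkl
  rw [getDA edges letters k hkl, getD_fill edges _ k hcs, getD_seed, innerA_eq]
  simp
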